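/- CARRIED OVER by tools/port_base_units.py (renaming only) from proofs.vorbis/Vorbis/Spec/Units, GENERATED there by farm/mkstatement.py from design/units.tsv (unit `log`) and the Specs of Vorbis/Spec/*.lean — do not edit.
   THE STATEMENT of the proof unit `log`: the function `log` (89 instructions) satisfies its contract,
   given the contracts of its callees. What the names mean: Vorbis/Spec/Basic.lean. The theorem to prove:
   `theorem log_ok : ProgX.Base.Spec.log.Statement`. -/
import ProgX.Base.Spec.Libm
namespace ProgX.Base.Spec.log
open X86 X86.User Asan

/-- The statement of unit `log`. -/
def Statement : Prop :=
  ∀ (Lay : Layout) (_hLay : Lay.hi = 0x1000000) (μ : Microarch) (_hμ : UserX.MicroOK μ) (u₀ : State)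
    (_hcode : HasCodeNat Lay u₀ ProgX.Base.L.log.entry ProgX.Base.Code.code_log.nat ProgX.Base.L.log.size)
    (_h_two_to : ∀ (others : List Obj) (frames : List (Nat × FrameLayout)), Calls Lay μ ProgX.Base.WayInv (ProgX.Base.conv u₀) ProgX.Base.L.two_to.entry (ProgX.Base.Spec.two_to.spec others frames)),
    ∀ (others : List Obj) (frames : List (Nat × FrameLayout)), Calls Lay μ ProgX.Base.WayInv (ProgX.Base.conv u₀) ProgX.Base.L.log.entry (ProgX.Base.Spec.log.spec others frames)

end ProgX.Base.Spec.log
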